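-- pv_equiv track=rewrite | github.com/shalommmitz/gated_ssh_ai_bridge | ssh_bridge.py | find_unquoted_chaining
-- ===== SOURCE A (Python) =====
-- def find_unquoted_chaining(command: str) -> list[str]:
--     operators: list[str] = []
--     in_single = False
--     in_double = False
--     escaped = False
--     index = 0
--
--     while index < len(command):
--         char = command[index]
--
--         if escaped:
--             escaped = False
--             index += 1
--             continue
--
--         if char == "\\":
--             escaped = True
--             index += 1
--             continue
--
--         if char == "'" and not in_double:
--             in_single = not in_single
--             index += 1
--             continue
--
--         if char == '"' and not in_single:
--             in_double = not in_double
--             index += 1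
--             continue
--
--         if not in_single and not in_double:
--             if command.startswith("&&", index):
--                 operators.append("&&")
--                 index += 2
--                 continue
--             if char == ";":
--                 operators.append(";")
--             elif char == "|":
--                 operators.append("|")
--
--         index += 1
--
--     return sorted(set(operators))
-- ===== SOURCE B (Python) =====
-- def _skip_quoted(command, i, quote):
--     n = len(command)
--     while i < n:
--         c = command[i]
--         if c == "\\":
--             i += 2
--         elif c == quote:
--             return i + 1
--         else:
--             i += 1
--     return i
--
--
-- def find_unquoted_chaining(command: str) -> list[str]:
--     found = set()
--     i = 0
--     n = len(command)
--     while i < n: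
--         c = command[i]
--         if c == "\\":
--             i += 2
--         elif c == "'" or c == '"':
--             i = _skip_quoted(command, i + 1, c)
--         elif command.startswith("&&", i):
--             found.add("&&")
--             i += 2
--         elif c == ";":
--             found.add(";")
--             i += 1
--         elif c == "|":
--             found.add("|")
--             i += 1
--         else:
--             i += 1
--     return sorted(found)
-- ===== Notes on version B (the rewrite author's own statement) =====
-- stated objective: simpler
-- what changed: A's per-character state machine with in_single/in_double/escaped flags is replaced by a tokenizer that consumes each escape pair or entire quoted region in one step and accumulates the operators directly in a set.
import Mathlib
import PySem

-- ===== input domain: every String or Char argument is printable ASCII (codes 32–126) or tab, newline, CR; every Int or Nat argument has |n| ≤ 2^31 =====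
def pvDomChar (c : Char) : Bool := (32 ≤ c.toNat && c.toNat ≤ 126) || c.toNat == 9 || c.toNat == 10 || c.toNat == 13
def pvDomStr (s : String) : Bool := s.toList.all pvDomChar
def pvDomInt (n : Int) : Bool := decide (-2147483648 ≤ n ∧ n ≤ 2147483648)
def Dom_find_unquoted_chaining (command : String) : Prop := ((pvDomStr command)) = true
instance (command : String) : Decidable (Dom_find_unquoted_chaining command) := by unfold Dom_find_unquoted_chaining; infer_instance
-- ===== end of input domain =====

-- B replaces A's per-character flag state machine (in_single/in_double/escaped) by a tokenizer
-- that consumes each escape pair or whole quoted region in one step and accumulates a set (simpler).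

-- ===== PORT A =====
-- A's while loop: one character per step, with in_single/in_double/escaped state flags;
-- command.startswith("&&", index) is read as: current char '&' and next char '&'
-- (the inner match consumes both; its [] arm is unreachable under the guard).
def loopA : List Char → Bool → Bool → Bool → List String → List String
  | [], _, _, _, ops => ops
  | c :: rest, inS, inD, escaped, ops =>
    if escaped then loopA rest inS inD false ops
    else if c = '\\' then loopA rest inS inD true ops
    else if c = '\'' && !inD then loopA rest (!inS) inD false ops
    else if c = '"' && !inS then loopA rest inS (!inD) false ops
    else if !inS && !inD then
      if c = '&' && rest.head? = some '&' then
        match rest with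
        | _ :: rest2 => loopA rest2 inS inD false (ops ++ ["&&"])
        | [] => ops
      else if c = ';' then loopA rest inS inD false (ops ++ [";"])
      else if c = '|' then loopA rest inS inD false (ops ++ ["|"])
      else loopA rest inS inD false ops
    else loopA rest inS inD false ops

def find_unquoted_chaining (command : String) : List String :=
  PySem.List.sorted (PySem.Set.ofList (loopA command.toList false false false []))
    (fun x => x) false

-- ===== PORT B =====
-- _skip_quoted: drop characters (an escape drops two) until the closing quote; returns the remainder.
def skipQuoted : List Char → Char → List Char
  | [], _ => []
  | c :: rest, q =>
    if c = '\\' then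
      match rest with
      | [] => []
      | _ :: rest2 => skipQuoted rest2 q
    else if c = q then rest
    else skipQuoted rest q

-- B's main loop: consume escapes and quoted regions wholesale, add operators to a set.
-- The Nat argument is fuel (one unit per Python iteration, the string length suffices): a
-- totality guard only, it never runs out on the actual call below.
def scanB : Nat → List Char → PySem.Set String → PySem.Set String
  | 0, _, found => found
  | _ + 1, [], found => found
  | fuel + 1, c :: rest, found =>
    if c = '\\' then scanB fuel rest.tail found
    else if c = '\'' || c = '"' then scanB fuel (skipQuoted rest c) found
    else if c = '&' && rest.head? = some '&' then scanB fuel rest.tail (PySem.Set.add found "&&")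
    else if c = ';' then scanB fuel rest (PySem.Set.add found ";")
    else if c = '|' then scanB fuel rest (PySem.Set.add found "|")
    else scanB fuel rest found

def find_unquoted_chaining_alt (command : String) : List String :=
  PySem.List.sorted (scanB command.toList.length command.toList PySem.Set.empty)
    (fun x => x) false

-- ===== PRECONDITION & SPEC =====
def Spec_find_unquoted_chaining (command : String) (out : List String) : Prop := out = find_unquoted_chaining_alt command
instance (command : String) (out : List String) : Decidable (Spec_find_unquoted_chaining command out) := by unfold Spec_find_unquoted_chaining; infer_instance

-- ===== CLAIM (what is proved, stated in full; the proofs are below) =====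
def Claim_equal_find_unquoted_chaining : Prop := ∀ (command : String), Dom_find_unquoted_chaining command → Spec_find_unquoted_chaining command (find_unquoted_chaining command)

-- ===== LEMMAS AND PROOFS =====

theorem skipQuoted_length_le (cs : List Char) (q : Char) :
    (skipQuoted cs q).length ≤ cs.length := by
  induction cs, q using skipQuoted.induct with
  | case1 => simp [skipQuoted]
  | case2 => simp [skipQuoted]
  | case3 q x rest2 ih => rw [skipQuoted.eq_def]; simp; omega
  | case4 rest q h => rw [skipQuoted.eq_def]; simp [h]
  | case5 c rest q h1 h2 ih => rw [skipQuoted.eq_def]; simp [h1, h2]; omega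

theorem ofList_append_singleton (acc : List String) (x : String) :
    PySem.Set.ofList (acc ++ [x]) = PySem.Set.add (PySem.Set.ofList acc) x := by
  simp [PySem.Set.ofList_eq_foldl, List.foldl_append]

-- While in a single-quoted region, A appends nothing and ends exactly where skipQuoted ends.
theorem loopA_single : ∀ (cs : List Char) (acc : List String),
    loopA cs true false false acc = loopA (skipQuoted cs '\'') false false false acc
  | [], acc => by simp [loopA, skipQuoted]
  | c :: rest, acc => by
    by_cases hb : c = '\\'
    · subst hb
      cases rest with
      | nil => simp [loopA, skipQuoted]
      | cons x rest2 =>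
        rw [loopA.eq_def, skipQuoted.eq_def]
        simp only [if_neg (by decide : ¬((false:Bool) = true))]
        rw [loopA.eq_def]
        exact loopA_single rest2 acc
    · by_cases hq : c = '\''
      · subst hq; rw [loopA.eq_def, skipQuoted.eq_def]; simp
      · rw [loopA.eq_def, skipQuoted.eq_def]
        simp [hb, hq]
        exact loopA_single rest acc
termination_by cs _ => cs.length
decreasing_by all_goals (simp only [List.length_cons]; omega)

-- While in a double-quoted region, likewise.
theorem loopA_double : ∀ (cs : List Char) (acc : List String),
    loopA cs false true false acc = loopA (skipQuoted cs '"') false false false acc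
  | [], acc => by simp [loopA, skipQuoted]
  | c :: rest, acc => by
    by_cases hb : c = '\\'
    · subst hb
      cases rest with
      | nil => simp [loopA, skipQuoted]
      | cons x rest2 =>
        rw [loopA.eq_def, skipQuoted.eq_def]
        simp only [if_neg (by decide : ¬((false:Bool) = true))]
        rw [loopA.eq_def]
        exact loopA_double rest2 acc
    · by_cases hq : c = '"'
      · subst hq; rw [loopA.eq_def, skipQuoted.eq_def]; simp
      · rw [loopA.eq_def, skipQuoted.eq_def]
        simp [hb, hq]
        exact loopA_double rest acc
termination_by cs _ => cs.length
decreasing_by all_goals (simp only [List.length_cons]; omega)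

-- Main invariant: with enough fuel, A's collected operator list, seen as a Python set, is B's set.
theorem loopA_scanB : ∀ (fuel : Nat) (cs : List Char) (acc : List String),
    cs.length ≤ fuel →
    PySem.Set.ofList (loopA cs false false false acc) = scanB fuel cs (PySem.Set.ofList acc)
  | fuel, [], acc, _ => by cases fuel <;> simp [loopA, scanB]
  | 0, c :: rest, acc, h => by simp at h
  | fuel + 1, c :: rest, acc, h => by
    have hf : rest.length ≤ fuel := by simp at h; omega
    by_cases hb : c = '\\'
    · subst hb
      cases rest with
      | nil =>
        rw [loopA.eq_def, scanB.eq_def]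
        simp only [if_neg (by decide : ¬((false:Bool) = true))]
        rw [loopA.eq_def, scanB.eq_def]
        cases fuel <;> simp
      | cons x rest2 =>
        rw [loopA.eq_def, scanB.eq_def]
        simp only [if_neg (by decide : ¬((false:Bool) = true))]
        rw [loopA.eq_def]
        exact loopA_scanB fuel rest2 acc (by simp at hf ⊢; omega)
    · by_cases hs : c = '\''
      · subst hs
        rw [loopA.eq_def, scanB.eq_def]
        simp only [if_neg hb]
        simp
        rw [loopA_single rest acc]
        exact loopA_scanB fuel (skipQuoted rest '\'') acc
          (le_trans (skipQuoted_length_le rest '\'') hf)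
      · by_cases hd : c = '"'
        · subst hd
          rw [loopA.eq_def, scanB.eq_def]
          simp [hb]
          rw [loopA_double rest acc]
          exact loopA_scanB fuel (skipQuoted rest '"') acc
            (le_trans (skipQuoted_length_le rest '"') hf)
        · by_cases ha : c = '&' ∧ rest.head? = some '&'
          · obtain ⟨hc, hh⟩ := ha
            subst hc
            cases rest with
            | nil => simp at hh
            | cons x rest2 =>
              simp only [List.head?_cons, Option.some.injEq] at hh
              subst hh
              rw [loopA.eq_def, scanB.eq_def]
              simp [hb, hs, hd]
              rw [loopA_scanB fuel rest2 (acc ++ ["&&"]) (by simp at hf ⊢; omega),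
                ofList_append_singleton]
          · have hcond : (decide (c = '&') && decide (rest.head? = some '&')) = false := by
              by_cases h1 : c = '&'
              · simp [h1]; tauto
              · simp [h1]
            by_cases h1 : c = ';'
            · subst h1
              rw [loopA.eq_def, scanB.eq_def]
              simp [hb, hs, hd]
              rw [loopA_scanB fuel rest (acc ++ [";"]) hf, ofList_append_singleton]
            · by_cases h2 : c = '|'
              · subst h2
                rw [loopA.eq_def, scanB.eq_def]
                simp [hb, hs, hd]
                rw [loopA_scanB fuel rest (acc ++ ["|"]) hf, ofList_append_singleton]
              · rw [loopA.eq_def, scanB.eq_def]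
                simp [hb, hs, hd, hcond, h1, h2]
                exact loopA_scanB fuel rest acc hf
termination_by fuel _ _ _ => fuel

-- ===== VERDICT (by name: the statement is the Claim_ definition above) =====
theorem find_unquoted_chaining_spec : Claim_equal_find_unquoted_chaining := by
  intro command _
  unfold Spec_find_unquoted_chaining find_unquoted_chaining find_unquoted_chaining_alt
  rw [loopA_scanB command.toList.length command.toList [] (le_refl _)]
  rfl
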